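-- pv_equiv track=rewrite | github.com/kylenewm/mvp-buildkit | src/agentic_mvp_factory/research_runner.py | _sort_findings_by_triage
-- ===== SOURCE A (Python) =====
-- from typing import Any, Dict, List, Optional, Set
--
-- def _bucket_sort_key(finding: dict, original_idx: int) -> tuple:
--     """Sort key: high=0, normal=1, low=2, junk=3, then original index."""
--     bucket = finding.get("triage_bucket", "normal")
--     rank = {"high": 0, "normal": 1, "low": 2, "junk": 3}.get(bucket, 1)
--     return (rank, original_idx)
--
-- def _sort_findings_by_triage(findings: List[dict]) -> List[dict]:
--     """
--     Sort findings by triage_bucket within each rq_id.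
--     Order: high → normal → low → junk. Stable within bucket.
--     """
--     from collections import OrderedDict
--     by_rq: Dict[str, List[tuple]] = OrderedDict()
--
--     for idx, finding in enumerate(findings):
--         rq_id = finding.get("rq_id", "")
--         if rq_id not in by_rq:
--             by_rq[rq_id] = []
--         by_rq[rq_id].append((idx, finding))
--
--     sorted_findings = []
--     for rq_id, items in by_rq.items():
--         sorted_items = sorted(items, key=lambda x: _bucket_sort_key(x[1], x[0]))
--         sorted_findings.extend([item[1] for item in sorted_items])
--
--     return sorted_findings
-- ===== SOURCE B (Python) =====
-- from typing import Dict, List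
--
--
-- def _sort_findings_by_triage(findings: List[dict]) -> List[dict]:
--     """
--     Bucket (counting) distribution instead of sorting: one pass drops each
--     finding into one of 4 ordered buckets of its rq_id group, then the groups
--     are emitted in first-seen order, each as bucket0+bucket1+bucket2+bucket3.
--     Stability comes for free from append order; no comparison sort at all.
--     """
--     order: List[str] = []                 # rq_ids in first-seen order
--     buckets: Dict[str, list] = {}         # rq_id -> [high, normal, low, junk]
--     for finding in findings:
--         rq_id = finding.get("rq_id", "")
--         b = buckets.get(rq_id)
--         if b is None:
--             order.append(rq_id)
--             b = buckets[rq_id] = [[], [], [], []]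
--         bucket = finding.get("triage_bucket", "normal")
--         if bucket == "high":
--             r = 0
--         elif bucket == "low":
--             r = 2
--         elif bucket == "junk":
--             r = 3
--         else:
--             r = 1
--         b[r].append(finding)
--     out: List[dict] = []
--     for rq_id in order:
--         b0, b1, b2, b3 = buckets[rq_id]
--         out += b0 + b1 + b2 + b3
--     return out
-- ===== Notes on version B (the rewrite author's own statement) =====
-- stated objective: alternative
-- what changed: Replaces the per-rq_id stable comparison sort keyed by (rank, index) with a single pass that distributes each finding into one of four ordered buckets of its group and concatenates the buckets in bucket order and first-seen group order.
import Mathlib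
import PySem

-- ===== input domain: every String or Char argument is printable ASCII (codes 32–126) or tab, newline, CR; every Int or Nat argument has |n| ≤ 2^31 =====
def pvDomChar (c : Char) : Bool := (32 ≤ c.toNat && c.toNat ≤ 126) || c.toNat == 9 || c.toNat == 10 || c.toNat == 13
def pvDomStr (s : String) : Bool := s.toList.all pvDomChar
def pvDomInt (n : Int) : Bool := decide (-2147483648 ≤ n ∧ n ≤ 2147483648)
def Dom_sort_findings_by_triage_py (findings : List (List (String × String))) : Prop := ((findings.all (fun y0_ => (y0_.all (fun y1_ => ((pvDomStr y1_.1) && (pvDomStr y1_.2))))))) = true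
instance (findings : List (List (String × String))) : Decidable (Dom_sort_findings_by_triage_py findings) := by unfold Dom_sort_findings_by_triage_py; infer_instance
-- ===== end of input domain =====

-- B replaces A's per-group comparison sort by a one-pass distribution into 4 ordered buckets per group (counting sort); return value only, neither version mutates its argument.

-- ===== PORT A =====
-- port of _bucket_sort_key: (rank, original_idx)
def pvBucketSortKey (finding : List (String × String)) (original_idx : Int) : Int × Int :=
  let bucket := (PySem.Dict.mk finding).getD "triage_bucket" "normal"
  let rank := (PySem.Dict.ofList [("high", (0 : Int)), ("normal", 1), ("low", 2), ("junk", 3)]).getD bucket 1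
  (rank, original_idx)

def sort_findings_by_triage_py (findings : List (List (String × String))) : List (List (String × String)) :=
  -- by_rq: OrderedDict rq_id -> list of (idx, finding); "if rq_id not in by_rq: by_rq[rq_id] = []" followed by append is Dict.modify with default []
  let by_rq := (PySem.List.enumerate findings).foldl
    (fun d p => d.modify ((PySem.Dict.mk p.2).getD "rq_id" "") [] (fun xs => xs ++ [p]))
    PySem.Dict.empty
  by_rq.items.foldl
    (fun acc pr =>
      let sorted_items := PySem.List.sorted2 pr.2
        (fun x => (pvBucketSortKey x.2 x.1).1) (fun x => (pvBucketSortKey x.2 x.1).2)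
      acc ++ sorted_items.map (fun item => item.2))
    []

-- ===== PORT B =====
def pvRankB (finding : List (String × String)) : Int :=
  let bucket := (PySem.Dict.mk finding).getD "triage_bucket" "normal"
  if bucket = "high" then 0
  else if bucket = "low" then 2
  else if bucket = "junk" then 3
  else 1

-- b[r].append(finding) on the 4-bucket quadruple
def pvAddBucket (b : List (List (String × String)) × List (List (String × String)) × List (List (String × String)) × List (List (String × String)))
    (r : Int) (f : List (String × String)) :
    List (List (String × String)) × List (List (String × String)) × List (List (String × String)) × List (List (String × String)) :=
  if r = 0 then (b.1 ++ [f], b.2.1, b.2.2.1, b.2.2.2)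
  else if r = 2 then (b.1, b.2.1, b.2.2.1 ++ [f], b.2.2.2)
  else if r = 3 then (b.1, b.2.1, b.2.2.1, b.2.2.2 ++ [f])
  else (b.1, b.2.1 ++ [f], b.2.2.1, b.2.2.2)

def sort_findings_by_triage_py_alt (findings : List (List (String × String))) : List (List (String × String)) :=
  let groups := findings.foldl
    (fun d f => d.modify ((PySem.Dict.mk f).getD "rq_id" "") ([], [], [], [])
      (fun b => pvAddBucket b (pvRankB f) f))
    PySem.Dict.empty
  groups.items.foldl
    (fun acc pr => acc ++ (pr.2.1 ++ (pr.2.2.1 ++ (pr.2.2.2.1 ++ pr.2.2.2.2))))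
    []

-- ===== PRECONDITION & SPEC =====
def Spec_sort_findings_by_triage_py (findings : List (List (String × String))) (out : List (List (String × String))) : Prop := out = sort_findings_by_triage_py_alt findings
instance (findings : List (List (String × String))) (out : List (List (String × String))) : Decidable (Spec_sort_findings_by_triage_py findings out) := by unfold Spec_sort_findings_by_triage_py; infer_instance

-- ===== CLAIM (what is proved, stated in full; the proofs are below) =====
def Claim_equal_sort_findings_by_triage_py : Prop := ∀ (findings : List (List (String × String))), Dom_sort_findings_by_triage_py findings → Spec_sort_findings_by_triage_py findings (sort_findings_by_triage_py findings)

-- ===== LEMMAS AND PROOFS =====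

-- the rank dictionary lookup, in closed form
theorem pvRankAux (b : String) :
    (PySem.Dict.ofList [("high", (0 : Int)), ("normal", 1), ("low", 2), ("junk", 3)]).getD b 1 =
      (if b = "high" then 0 else if b = "low" then 2 else if b = "junk" then 3 else 1) := by
  by_cases h0 : b = "high" <;> by_cases h1 : b = "normal" <;> by_cases h2 : b = "low" <;> by_cases h3 : b = "junk" <;>
    simp_all <;>
    first
      | decide
      | simp [PySem.Dict.ofList, PySem.Dict.update, PySem.Dict.insert, PySem.Dict.empty,
              PySem.Dict.getD_eq_get?_getD, PySem.Dict.get?,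
              Ne.symm h0, Ne.symm h1, Ne.symm h2, Ne.symm h3]

-- A's rank and B's rank agree on every finding
theorem pvRank_eq (f : List (String × String)) (i : Int) :
    (pvBucketSortKey f i).1 = pvRankB f := by
  simp only [pvBucketSortKey, pvRankB, pvRankAux]

theorem pvRankB_cases (f : List (String × String)) :
    pvRankB f = 0 ∨ pvRankB f = 1 ∨ pvRankB f = 2 ∨ pvRankB f = 3 := by
  by_cases h0 : (PySem.Dict.mk f).getD "triage_bucket" "normal" = "high" <;>
  by_cases h2 : (PySem.Dict.mk f).getD "triage_bucket" "normal" = "low" <;>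
  by_cases h3 : (PySem.Dict.mk f).getD "triage_bucket" "normal" = "junk" <;>
    simp [pvRankB, h0, h2, h3]

-- enumerate facts
theorem pv_enumerate_map_snd {α : Type} (l : List α) (s : Int) :
    (PySem.List.enumerate l s).map Prod.snd = l := by
  induction l generalizing s with
  | nil => simp [PySem.List.enumerate]
  | cons x t ih => simp [PySem.List.enumerate, ih]

theorem pv_mem_enumerate_fst_ge {α : Type} (l : List α) (s : Int) :
    ∀ p ∈ PySem.List.enumerate l s, s ≤ p.1 := by
  induction l generalizing s with
  | nil => simp [PySem.List.enumerate]
  | cons x t ih =>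
    intro p hp
    simp only [PySem.List.enumerate, List.mem_cons] at hp
    rcases hp with h | h
    · simp [h]
    · have := ih (s + 1) p h; omega

theorem pv_enumerate_pairwise_fst {α : Type} (l : List α) (s : Int) :
    (PySem.List.enumerate l s).Pairwise (fun a b => a.1 < b.1) := by
  induction l generalizing s with
  | nil => simp [PySem.List.enumerate]
  | cons x t ih =>
    simp only [PySem.List.enumerate, List.pairwise_cons]
    exact ⟨fun p hp => by have := pv_mem_enumerate_fst_ge t (s + 1) p hp; omega, ih (s + 1)⟩

-- generic grouping loop: the value sitting at key c after the whole fold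
theorem pv_getD_foldl_modify {κ ν β : Type} [BEq κ] [LawfulBEq κ] [DecidableEq κ]
    (l : List β) (key : β → κ) (d0 : ν) (upd : ν → β → ν) (d : PySem.Dict κ ν) (c : κ) :
    (l.foldl (fun d x => d.modify (key x) d0 (fun v => upd v x)) d).getD c d0 =
      (l.filter (fun x => key x == c)).foldl upd (d.getD c d0) := by
  induction l generalizing d with
  | nil => rfl
  | cons x t ih =>
    simp only [List.foldl_cons, List.filter_cons]
    by_cases h : key x = c
    · subst h
      simp [ih, PySem.Dict.getD_modify_self]
    · have hne : (key x == c) = false := by simp [h]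
      simp [hne, ih, PySem.Dict.getD_modify, Ne.symm h]


-- B's bucket fold = four filters
theorem pv_bucket_foldl (g : List (List (String × String)))
    (a0 a1 a2 a3 : List (List (String × String))) :
    g.foldl (fun b f => pvAddBucket b (pvRankB f) f) (a0, a1, a2, a3) =
      (a0 ++ g.filter (fun f => pvRankB f == 0),
       a1 ++ g.filter (fun f => pvRankB f == 1),
       a2 ++ g.filter (fun f => pvRankB f == 2),
       a3 ++ g.filter (fun f => pvRankB f == 3)) := by
  induction g generalizing a0 a1 a2 a3 with
  | nil => simp
  | cons f t ih =>
    rcases pvRankB_cases f with h | h | h | h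
    · rw [List.foldl_cons,
        show pvAddBucket (a0, a1, a2, a3) (pvRankB f) f = (a0 ++ [f], a1, a2, a3) from by
          simp [pvAddBucket, h], ih]
      simp [h]
    · rw [List.foldl_cons,
        show pvAddBucket (a0, a1, a2, a3) (pvRankB f) f = (a0, a1 ++ [f], a2, a3) from by
          simp [pvAddBucket, h], ih]
      simp [h]
    · rw [List.foldl_cons,
        show pvAddBucket (a0, a1, a2, a3) (pvRankB f) f = (a0, a1, a2 ++ [f], a3) from by
          simp [pvAddBucket, h], ih]
      simp [h]
    · rw [List.foldl_cons,
        show pvAddBucket (a0, a1, a2, a3) (pvRankB f) f = (a0, a1, a2, a3 ++ [f]) from by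
          simp [pvAddBucket, h], ih]
      simp [h]

-- a list all of whose ranks lie in {0,1,2,3} is a permutation of its four rank-filters
theorem pv_perm_four {α : Type} (p : α → Int) (xs : List α)
    (h : ∀ x ∈ xs, p x = 0 ∨ p x = 1 ∨ p x = 2 ∨ p x = 3) :
    (xs.filter (fun x => p x == 0) ++ (xs.filter (fun x => p x == 1) ++
      (xs.filter (fun x => p x == 2) ++ xs.filter (fun x => p x == 3)))).Perm xs := by
  induction xs with
  | nil => simp
  | cons x t ih =>
    have ht := ih (fun y hy => h y (List.mem_cons_of_mem x hy))
    rcases h x (List.mem_cons_self) with hx | hx | hx | hx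
    · simp only [List.filter_cons, hx]
      norm_num
      exact ht
    · simp only [List.filter_cons, hx]
      norm_num
      exact List.perm_middle.trans (ht.cons x)
    · simp only [List.filter_cons, hx]
      norm_num
      exact ((List.Perm.append_left _ List.perm_middle).trans List.perm_middle).trans (ht.cons x)
    · simp only [List.filter_cons, hx]
      norm_num
      exact ((List.Perm.append_left _ ((List.Perm.append_left _ List.perm_middle).trans
        List.perm_middle)).trans List.perm_middle).trans (ht.cons x)

-- sorted2 is sorted with the lexicographic key
theorem pv_sorted2_eq_sorted_lex {α : Type} (xs : List α) (k1 k2 : α → Int) :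
    PySem.List.sorted2 xs k1 k2 = PySem.List.sorted xs (fun x => toLex (k1 x, k2 x)) := by
  unfold PySem.List.sorted2 PySem.List.sorted
  simp only [Bool.false_eq_true, if_false]
  congr 1
  funext acc x
  congr 1
  funext a b
  by_cases h1 : k1 a < k1 b <;> by_cases h2 : k1 b < k1 a <;> by_cases h3 : k2 a < k2 b <;>
    simp [Prod.Lex.toLex_lt_toLex, h1, h2, h3] <;> omega

-- the stable sort of a list with strictly increasing indices is the rank-filter concatenation
theorem pv_sorted2_eq_four (e : List (Int × List (String × String)))
    (hp : e.Pairwise (fun a b => a.1 < b.1)) :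
    PySem.List.sorted2 e (fun x => pvRankB x.2) (fun x => x.1) =
      e.filter (fun x => pvRankB x.2 == 0) ++ (e.filter (fun x => pvRankB x.2 == 1) ++
        (e.filter (fun x => pvRankB x.2 == 2) ++ e.filter (fun x => pvRankB x.2 == 3))) := by
  rw [pv_sorted2_eq_sorted_lex]
  apply PySem.List.sorted_eq_of_perm_of_pairwise_lt
  · exact pv_perm_four _ e (fun x _ => pvRankB_cases x.2)
  · have hblock : ∀ i : Int, (e.filter (fun x => pvRankB x.2 == i)).Pairwise
        (fun a b => toLex (pvRankB a.2, a.1) < toLex (pvRankB b.2, b.1)) := by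
      intro i
      refine List.Pairwise.imp_of_mem ?_ (hp.filter (fun x => pvRankB x.2 == i))
      intro a b ha hb hlt
      have hai : pvRankB a.2 = i := by simpa using (List.mem_filter.mp ha).2
      have hbi : pvRankB b.2 = i := by simpa using (List.mem_filter.mp hb).2
      exact Prod.Lex.toLex_lt_toLex.mpr (Or.inr ⟨by rw [hai, hbi], hlt⟩)
    have hcross : ∀ (i j : Int), i < j → ∀ a ∈ e.filter (fun x => pvRankB x.2 == i),
        ∀ b ∈ e.filter (fun x => pvRankB x.2 == j),
        toLex (pvRankB a.2, a.1) < toLex (pvRankB b.2, b.1) := by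
      intro i j hij a ha b hb
      have hai : pvRankB a.2 = i := by simpa using (List.mem_filter.mp ha).2
      have hbj : pvRankB b.2 = j := by simpa using (List.mem_filter.mp hb).2
      exact Prod.Lex.toLex_lt_toLex.mpr (Or.inl (by rw [hai, hbj]; exact hij))
    refine List.pairwise_append.mpr ⟨hblock 0, List.pairwise_append.mpr
      ⟨hblock 1, List.pairwise_append.mpr ⟨hblock 2, hblock 3, hcross 2 3 (by norm_num)⟩, ?_⟩, ?_⟩
    · intro a ha b hb
      rcases List.mem_append.mp hb with h | h
      · exact hcross 1 2 (by norm_num) a ha b h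
      · exact hcross 1 3 (by norm_num) a ha b h
    · intro a ha b hb
      rcases List.mem_append.mp hb with h | h
      · exact hcross 0 1 (by norm_num) a ha b h
      rcases List.mem_append.mp h with h' | h'
      · exact hcross 0 2 (by norm_num) a ha b h'
      · exact hcross 0 3 (by norm_num) a ha b h'

-- filtering through snd commutes with projecting snd
theorem pv_filter_map_snd {α β : Type} (l : List (β × α)) (p : α → Bool) :
    (l.filter (fun x => p x.2)).map Prod.snd = (l.map Prod.snd).filter p := by
  induction l with
  | nil => simp
  | cons x t ih =>
    by_cases h : p x.2 <;> simp [h, ih]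

-- specialisations of pv_filter_map_snd at the two predicates that occur
theorem pv_map_snd_filter_rank (l : List (Int × List (String × String))) (i : Int) :
    (l.filter (fun x => pvRankB x.2 == i)).map Prod.snd =
      (l.map Prod.snd).filter (fun f => pvRankB f == i) :=
  pv_filter_map_snd l (fun f => pvRankB f == i)

theorem pv_map_snd_filter_rq (l : List (Int × List (String × String))) (k : String) :
    (l.filter (fun p => (PySem.Dict.mk p.2).getD "rq_id" "" == k)).map Prod.snd =
      (l.map Prod.snd).filter (fun f => (PySem.Dict.mk f).getD "rq_id" "" == k) :=
  pv_filter_map_snd l (fun f => (PySem.Dict.mk f).getD "rq_id" "" == k)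

-- ===== VERDICT (by name: the statement is the Claim_ definition above) =====
theorem sort_findings_by_triage_py_spec : Claim_equal_sort_findings_by_triage_py := by
  intro findings _
  unfold Spec_sort_findings_by_triage_py
  dsimp only [sort_findings_by_triage_py, sort_findings_by_triage_py_alt]
  rw [PySem.List.foldl_append_eq_flatMap, PySem.List.foldl_append_eq_flatMap]
  simp only [List.nil_append]
  -- name the two dicts
  set dA := (PySem.List.enumerate findings).foldl
    (fun d p => d.modify ((PySem.Dict.mk p.2).getD "rq_id" "") [] (fun xs => xs ++ [p]))
    PySem.Dict.empty with hdA
  set dB := findings.foldl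
    (fun d f => d.modify ((PySem.Dict.mk f).getD "rq_id" "") ([], [], [], [])
      (fun b => pvAddBucket b (pvRankB f) f))
    PySem.Dict.empty with hdB
  have hnodA : dA.keys.Nodup := by
    rw [hdA]
    exact PySem.Dict.nodup_keys_foldl_modify_key _ _ _ _ _ (by simp)
  have hnodB : dB.keys.Nodup := by
    rw [hdB]
    exact PySem.Dict.nodup_keys_foldl_modify_key _ _ _ _ _ (by simp)
  have hkeys : dA.keys = dB.keys := by
    have hmaps : (PySem.List.enumerate findings).map
        (fun p => (PySem.Dict.mk p.2).getD "rq_id" "") =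
        findings.map (fun f => (PySem.Dict.mk f).getD "rq_id" "") := by
      rw [show (fun (p : Int × List (String × String)) => (PySem.Dict.mk p.2).getD "rq_id" "") =
          (fun f => (PySem.Dict.mk f).getD "rq_id" "") ∘ Prod.snd from rfl,
        ← List.map_map, pv_enumerate_map_snd]
    rw [hdA, hdB, PySem.Dict.keys_foldl_modify_key, PySem.Dict.keys_foldl_modify_key, hmaps]
    rfl
  rw [PySem.Dict.items_eq_map_keys dA hnodA [],
    PySem.Dict.items_eq_map_keys dB hnodB ([], [], [], []),
    hkeys, List.flatMap_map, List.flatMap_map]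
  refine List.flatMap_congr (fun k _ => ?_)
  -- per-key contents
  have hgA : dA.getD k [] = (PySem.List.enumerate findings).filter
      (fun p => (PySem.Dict.mk p.2).getD "rq_id" "" == k) := by
    rw [hdA, pv_getD_foldl_modify, PySem.Dict.getD_empty,
      PySem.List.foldl_append_singleton_eq_self, List.nil_append]
  have hgB : dB.getD k ([], [], [], []) =
      (((findings.filter (fun f => (PySem.Dict.mk f).getD "rq_id" "" == k)).filter (fun f => pvRankB f == 0),
        (findings.filter (fun f => (PySem.Dict.mk f).getD "rq_id" "" == k)).filter (fun f => pvRankB f == 1),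
        (findings.filter (fun f => (PySem.Dict.mk f).getD "rq_id" "" == k)).filter (fun f => pvRankB f == 2),
        (findings.filter (fun f => (PySem.Dict.mk f).getD "rq_id" "" == k)).filter (fun f => pvRankB f == 3))) := by
    rw [hdB, pv_getD_foldl_modify, PySem.Dict.getD_empty, pv_bucket_foldl]
    simp only [List.nil_append]
  dsimp only
  rw [hgA, hgB]
  -- normalise A's sort keys
  rw [show (fun (x : Int × List (String × String)) => (pvBucketSortKey x.2 x.1).1) =
      (fun x => pvRankB x.2) from funext fun x => pvRank_eq x.2 x.1,
    show (fun (x : Int × List (String × String)) => (pvBucketSortKey x.2 x.1).2) =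
      (fun x => x.1) from rfl]
  rw [pv_sorted2_eq_four _
    ((pv_enumerate_pairwise_fst findings 0).filter _)]
  simp only [List.map_append]
  simp only [show (fun (item : Int × List (String × String)) => item.2) =
    (Prod.snd : Int × List (String × String) → List (String × String)) from rfl]
  rw [pv_map_snd_filter_rank, pv_map_snd_filter_rank, pv_map_snd_filter_rank,
    pv_map_snd_filter_rank, pv_map_snd_filter_rq, pv_enumerate_map_snd]
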